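-- pv_equiv track=rewrite | github.com/umairz5723/Coachable-Umair-Zaib-Repository | leetcode/ibm_count_teams.py | count_teams
-- ===== SOURCE A (Python) =====
-- from math import comb
-- from typing import List
--
-- def count_teams(skills: List[int], min_players: int, min_lvl: int, max_lvl: int) -> int:
--     """
--     This function determines the number of
--     combinations that can be formed when
--     creating a team of valid players.
--
--     Critia: In order for a player to be eligible
--     they must have a level of at least min_level
--     and at most max_level. We handle this in the initial
--     loop.
--
--     After determing the number of eligible players
--     we can then calculate the number of teams
--     that can formed using the combinations. We start
--     at the min_players position and move towards
--     eligible + 1: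
--         (Exp: min_players = 3, eligible = 4, min_level = 4, max_level = 10)
--         total_teams += comb(4,3) = 4
--         total_teams += comb(4,4) = 1
--         = 4 + 1 = 5
--
--     """
--     # Step 1: Count the number of eligible players
--     eligible = 0
--     for skill in skills:
--         if min_lvl <= skill <= max_lvl:
--             eligible += 1
--
--     # Step 2: Calculate the total number of valid teams
--     total_teams = 0
--     for team_size in range(min_players, eligible + 1):
--         total_teams += comb(eligible, team_size)
--
--     return total_teams
-- ===== SOURCE B (Python) =====
-- def count_teams(skills, min_players, min_lvl, max_lvl):
--     # Count eligible players, then sum C(e, k) for k >= min_players as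
--     # 2**e minus the prefix sum below min_players, maintaining the running
--     # binomial with the recurrence C(e, k+1) = C(e, k) * (e - k) // (k + 1).
--     eligible = sum(1 for s in skills if min_lvl <= s <= max_lvl)
--     if min_players > eligible:
--         return 0
--     total = 1 << eligible
--     c = 1
--     for k in range(min_players):
--         total -= c
--         c = c * (eligible - k) // (k + 1)
--     return total
-- ===== Notes on version B (the rewrite author's own statement) =====
-- stated objective: alternative
-- what changed: Replaces the per-size math.comb summation loop by the complement identity sum_{k>=m} C(e,k) = 2**e - sum_{k<m} C(e,k), maintaining the running binomial with the incremental recurrence C(e,k+1) = C(e,k)*(e-k)//(k+1) in a single pass; fewer big-int operations (O(n+min_players) vs O(n+e^2)), though a timing run did not confirm a >=1.5x speed-up.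
import Mathlib
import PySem

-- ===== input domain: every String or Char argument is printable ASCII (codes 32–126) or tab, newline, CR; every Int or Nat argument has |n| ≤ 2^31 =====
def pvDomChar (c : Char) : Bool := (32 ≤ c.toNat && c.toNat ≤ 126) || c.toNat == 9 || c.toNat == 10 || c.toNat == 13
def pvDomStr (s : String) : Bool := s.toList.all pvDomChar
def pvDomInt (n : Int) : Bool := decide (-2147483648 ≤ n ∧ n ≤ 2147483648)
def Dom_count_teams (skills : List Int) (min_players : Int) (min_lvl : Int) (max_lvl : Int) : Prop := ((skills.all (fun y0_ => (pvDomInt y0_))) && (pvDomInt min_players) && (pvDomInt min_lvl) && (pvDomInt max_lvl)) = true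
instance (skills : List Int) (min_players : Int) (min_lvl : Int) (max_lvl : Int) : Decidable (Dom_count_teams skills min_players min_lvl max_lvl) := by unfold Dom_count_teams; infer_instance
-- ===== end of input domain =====

-- B replaces A's per-size math.comb summation by the complement identity
-- sum_{k>=m} C(e,k) = 2**e - sum_{k<m} C(e,k) with an incrementally maintained binomial (a different algorithm, similar measured cost).

-- ===== PORT A =====
def count_teams (skills : List Int) (min_players : Int) (min_lvl : Int) (max_lvl : Int) : Int :=
  -- Step 1: count eligible players
  let eligible : Int :=
    skills.foldl (fun acc skill => if min_lvl ≤ skill ∧ skill ≤ max_lvl then acc + 1 else acc) 0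
  -- Step 2: sum math.comb(eligible, team_size); on the nonnegative arguments Pre_ admits,
  -- math.comb is exactly Nat.choose
  (PySem.List.pyRange min_players (eligible + 1) 1).foldl
    (fun total_teams team_size => total_teams + ((eligible.toNat.choose team_size.toNat : Nat) : Int)) 0

-- ===== PORT B =====
def count_teams_alt (skills : List Int) (min_players : Int) (min_lvl : Int) (max_lvl : Int) : Int :=
  let eligible : Int := ((skills.filter (fun s => decide (min_lvl ≤ s ∧ s ≤ max_lvl))).length : Int)
  if min_players > eligible then 0
  else
    ((PySem.List.pyRange 0 min_players 1).foldl
      (fun (p : Int × Int) k => (p.1 - p.2, PySem.Int.floordiv (p.2 * (eligible - k)) (k + 1)))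
      ((1 : Int) <<< eligible.toNat, 1)).1

-- ===== PRECONDITION & SPEC =====
-- math.comb raises ValueError on a negative k, which A reaches exactly when min_players < 0
-- (range(min_players, eligible+1) is then nonempty since eligible ≥ 0).
def Pre_count_teams (skills : List Int) (min_players : Int) (min_lvl : Int) (max_lvl : Int) : Prop :=
  0 ≤ min_players
instance (skills : List Int) (min_players : Int) (min_lvl : Int) (max_lvl : Int) : Decidable (Pre_count_teams skills min_players min_lvl max_lvl) := by unfold Pre_count_teams; infer_instance

def pvWitness_count_teams : List Int × Int × Int × Int := ([1, 2, 3, 7], 2, 1, 3)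

def Spec_count_teams (skills : List Int) (min_players : Int) (min_lvl : Int) (max_lvl : Int) (out : Int) : Prop := out = count_teams_alt skills min_players min_lvl max_lvl
instance (skills : List Int) (min_players : Int) (min_lvl : Int) (max_lvl : Int) (out : Int) : Decidable (Spec_count_teams skills min_players min_lvl max_lvl out) := by unfold Spec_count_teams; infer_instance

-- ===== CLAIM (what is proved, stated in full; the proofs are below) =====
def Claim_equal_count_teams : Prop := ∀ (skills : List Int) (min_players : Int) (min_lvl : Int) (max_lvl : Int), Dom_count_teams skills min_players min_lvl max_lvl → Pre_count_teams skills min_players min_lvl max_lvl → Spec_count_teams skills min_players min_lvl max_lvl (count_teams skills min_players min_lvl max_lvl)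


-- ===== LEMMAS AND PROOFS =====

-- B's loop invariant: after k = 0 .. m-1 the state is (2^e - Σ_{j<m} C(e,j), C(e,m)).
lemma count_teams_loop (e : Nat) : ∀ (m : Nat), m ≤ e →
    (List.range m).foldl
      (fun (p : Int × Int) k =>
        (p.1 - p.2, PySem.Int.floordiv (p.2 * ((e : Int) - (k : Nat))) ((k : Nat) + 1)))
      ((2 ^ e : Nat), 1)
    = (((2 ^ e : Nat) : Int) - ((∑ j ∈ Finset.range m, e.choose j : Nat) : Int),
       ((e.choose m : Nat) : Int)) := by
  intro m
  induction m with
  | zero => intro _; simp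
  | succ m ih =>
    intro hm
    have hm' : m ≤ e := Nat.le_of_succ_le hm
    rw [List.range_succ, List.foldl_append, ih hm']
    simp only [List.foldl_cons, List.foldl_nil]
    have hsub : (e : Int) - (m : Nat) = ((e - m : Nat) : Int) := by
      push_cast [Nat.sub_add_cancel, hm']; omega
    have hprod : ((e.choose m : Nat) : Int) * ((e : Int) - (m : Nat))
        = ((e.choose (m + 1) * (m + 1) : Nat) : Int) := by
      rw [hsub, ← Nat.cast_mul, ← Nat.choose_succ_right_eq]
    simp only [Prod.mk.injEq]
    refine ⟨?_, ?_⟩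
    · rw [Finset.sum_range_succ]; push_cast; ring
    · rw [hprod]
      have : ((m : Nat) : Int) + 1 = ((m + 1 : Nat) : Int) := by push_cast; ring
      rw [this, PySem.Int.floordiv_natCast]
      rw [Nat.mul_div_cancel _ (Nat.succ_pos m)]

-- A's counting loop equals B's filter length.
lemma count_teams_eligible (skills : List Int) (lo hi : Int) :
    skills.foldl (fun acc skill => if lo ≤ skill ∧ skill ≤ hi then acc + 1 else acc) (0 : Int)
    = ((skills.filter (fun s => decide (lo ≤ s ∧ s ≤ hi))).length : Int) := by
  rw [PySem.List.foldl_ite_add_one, zero_add, List.countP_eq_length_filter]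

-- ===== VERDICT (by name: the statement is the Claim_ definition above) =====
theorem count_teams_spec : Claim_equal_count_teams := by
  intro skills mp lo hi _ hpre
  unfold Spec_count_teams count_teams count_teams_alt
  simp only [count_teams_eligible]
  set e : Nat := (skills.filter (fun s => decide (lo ≤ s ∧ s ≤ hi))).length with he
  have hpre' : 0 ≤ mp := hpre
  by_cases hbig : mp > (e : Int)
  · -- range(min_players, eligible+1) is empty; both return 0
    rw [if_pos hbig, PySem.List.pyRange_one_eq_nil (by omega)]
    simp
  · rw [if_neg hbig]
    rw [not_lt] at hbig
    obtain ⟨m, rfl⟩ : ∃ m : Nat, mp = (m : Int) := ⟨mp.toNat, (Int.toNat_of_nonneg hpre').symm⟩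
    have hm : m ≤ e := by exact_mod_cast hbig
    -- A side: sum of C(e, m+j) for j < e+1-m
    rw [Int.toNat_natCast]
    have hA : (PySem.List.pyRange (m : Int) ((e : Int) + 1) 1).foldl
        (fun t k => t + ((e.choose k.toNat : Nat) : Int)) 0
        = ((∑ j ∈ Finset.range (e + 1 - m), e.choose (m + j) : Nat) : Int) := by
      rw [PySem.List.pyRange_one, List.foldl_map, PySem.List.foldl_add, zero_add]
      have hlen : ((e : Int) + 1 - (m : Int)).toNat = e + 1 - m := by omega
      rw [hlen]
      induction (e + 1 - m) with
      | zero => simp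
      | succ n ihn =>
        rw [List.range_succ, List.map_append, List.sum_append, ihn, Finset.sum_range_succ]
        have : ((m : Int) + (n : Int)).toNat = m + n := by omega
        simp [this]
    -- B side: loop over range(0, m)
    have hB : (PySem.List.pyRange 0 (m : Int) 1).foldl
        (fun (p : Int × Int) k => (p.1 - p.2, PySem.Int.floordiv (p.2 * ((e : Int) - k)) (k + 1)))
        ((1 : Int) <<< e, 1)
        = (((2 ^ e : Nat) : Int) - ((∑ j ∈ Finset.range m, e.choose j : Nat) : Int),
           ((e.choose m : Nat) : Int)) := by
      have hshift : (1 : Int) <<< e = ((2 ^ e : Nat) : Int) := by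
        rw [Int.shiftLeft_eq, one_mul]; push_cast; ring
      rw [hshift, PySem.List.pyRange_one, List.foldl_map]
      have hlen : ((m : Int) - 0).toNat = m := by omega
      rw [hlen, ← count_teams_loop e m hm]
      apply PySem.List.foldl_congr_mem
      intro acc x _
      simp
    rw [hA, hB]
    -- the two Nat sums are complementary: Σ_{j<m} + Σ_{j<e+1-m} C(e,m+j) = 2^e
    have hsplit : (∑ j ∈ Finset.range m, e.choose j)
        + (∑ j ∈ Finset.range (e + 1 - m), e.choose (m + j)) = 2 ^ e := by
      have h1 : m + (e + 1 - m) = e + 1 := by omega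
      have := Finset.sum_range_add (fun i => e.choose i) m (e + 1 - m)
      rw [h1, Nat.sum_range_choose] at this
      omega
    omega
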